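-- pv_equiv track=rewrite | github.com/Habibat-Jimoh/test-app | m.py | organize_sections_by_year
-- ===== SOURCE A (Python) =====
-- from collections import defaultdict
--
-- def organize_sections_by_year(subtab):
--     year_groups = defaultdict(list)
--     all_years = set()
--
--     for section in subtab["sections"]:
--         year = section.get("Year")
--         if year:
--             all_years.add(str(year))
--
--     sorted_years = sorted(all_years, reverse=True)
--     if not sorted_years:
--         sorted_years = ['all']
--
--     # Sort sections by SectionOrder (convert to int for proper numerical sorting)
--     sorted_sections = sorted(subtab["sections"],
--                              key=lambda section: int(section.get("SectionOrder", "0")))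
--
--     for section in sorted_sections:
--         year = section.get("Year")
--         if year:
--             year_groups[str(year)].append(section)
--         else:
--             for y in sorted_years:
--                 year_groups[y].append(section)
--
--     return sorted_years, year_groups
-- ===== SOURCE B (Python) =====
-- from collections import defaultdict
--
-- def organize_sections_by_year(subtab):
--     sections = subtab["sections"]
--     sorted_years = sorted({str(s["Year"]) for s in sections if s.get("Year")},
--                           reverse=True) or ['all']
--     sorted_sections = sorted(sections, key=lambda s: int(s.get("SectionOrder", "0")))
--     # expand each section into (year, section) events: an undated section belongs to every year
--     events = [(y, s) for s in sorted_sections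
--               for y in ([str(s["Year"])] if s.get("Year") else sorted_years)]
--     keys = list(dict.fromkeys(y for y, _ in events))
--     groups = defaultdict(list, {y: [s for yy, s in events if yy == y] for y in keys})
--     return sorted_years, groups
-- ===== Notes on version B (the rewrite author's own statement) =====
-- stated objective: alternative
-- what changed: B expands each sorted section into a flat (year, section) event list (an undated section yields one event per year), dedupes the event years with dict.fromkeys and builds each year's group by filtering the event list, instead of A's single nested-loop pass appending sections into a defaultdict.
import Mathlib
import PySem

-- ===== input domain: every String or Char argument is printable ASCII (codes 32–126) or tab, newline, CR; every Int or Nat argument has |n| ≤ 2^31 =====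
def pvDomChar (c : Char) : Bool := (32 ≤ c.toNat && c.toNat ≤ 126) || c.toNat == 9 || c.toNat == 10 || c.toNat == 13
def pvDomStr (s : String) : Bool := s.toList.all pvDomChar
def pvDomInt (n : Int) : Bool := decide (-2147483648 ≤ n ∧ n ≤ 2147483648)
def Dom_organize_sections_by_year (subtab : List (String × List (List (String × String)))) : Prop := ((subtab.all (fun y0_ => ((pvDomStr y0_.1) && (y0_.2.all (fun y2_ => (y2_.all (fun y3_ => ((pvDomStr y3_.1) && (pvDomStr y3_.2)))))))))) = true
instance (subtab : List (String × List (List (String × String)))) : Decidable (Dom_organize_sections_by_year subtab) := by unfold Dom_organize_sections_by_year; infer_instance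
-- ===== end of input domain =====

-- B expands sections into a flat (year, section) event list, dedupes the event years and builds each
-- group by filtering the events, instead of A's nested-loop pass appending into a defaultdict; same cost.

-- shared accessors: both Pythons read section.get("Year") / section.get("SectionOrder", "0") this way
def pvSecYear? (sec : List (String × String)) : Option String :=
  (PySem.Dict.mk sec).get? "Year"

-- truthiness of section.get("Year"): a present, non-empty string
def pvDated (sec : List (String × String)) : Bool :=
  match pvSecYear? sec with
  | some y => !(y == "")
  | none => false

-- str(section["Year"]) for a dated section
def pvYearStr (sec : List (String × String)) : String := (pvSecYear? sec).getD ""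

-- int(section.get("SectionOrder", "0")); Pre_ guarantees ofStr? succeeds, the getD 0 only totalises
def pvOrderKey (sec : List (String × String)) : Int :=
  (PySem.Int.ofStr? (((PySem.Dict.mk sec).get? "SectionOrder").getD "0")).getD 0

-- ===== PORT A =====
def organize_sections_by_year (subtab : List (String × List (List (String × String)))) : List String × (List (String × List (List (String × String)))) :=
  match (PySem.Dict.mk subtab).get? "sections" with
  | none => ([], [])  -- Python raises KeyError here; excluded by Pre_
  | some sections =>
    let allYears : PySem.Set String :=
      sections.foldl (fun st sec => if pvDated sec then PySem.Set.add st (pvYearStr sec) else st)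
        PySem.Set.empty
    let sortedYears0 := PySem.List.sorted allYears (fun y => y) true
    let sortedYears := if sortedYears0 = [] then ["all"] else sortedYears0
    let sortedSections := PySem.List.sorted sections pvOrderKey false
    let yearGroups := sortedSections.foldl (fun d sec =>
        if pvDated sec then d.modify (pvYearStr sec) [] (· ++ [sec])
        else sortedYears.foldl (fun d y => d.modify y [] (· ++ [sec])) d)
      PySem.Dict.empty
    (sortedYears, yearGroups.items)

-- ===== PORT B =====
def organize_sections_by_year_alt (subtab : List (String × List (List (String × String)))) : List String × (List (String × List (List (String × String)))) :=
  match (PySem.Dict.mk subtab).get? "sections" with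
  | none => ([], [])  -- Python raises KeyError here; excluded by Pre_
  | some sections =>
    let sortedYears0 :=
      PySem.List.sorted (PySem.Set.ofList ((sections.filter pvDated).map pvYearStr)) (fun y => y) true
    let sortedYears := if sortedYears0 = [] then ["all"] else sortedYears0
    let sortedSections := PySem.List.sorted sections pvOrderKey false
    let events : List (String × List (String × String)) :=
      sortedSections.flatMap (fun s =>
        (if pvDated s then [pvYearStr s] else sortedYears).map (fun y => (y, s)))
    let keys : List String := PySem.Set.ofList (events.map (·.1))
    let groups := keys.foldl (fun d y =>
        d.insert y ((events.filter (fun p => p.1 == y)).map (·.2))) PySem.Dict.empty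
    (sortedYears, groups.items)

-- ===== PRECONDITION & SPEC =====
-- Pre_ excludes exactly the inputs where A raises: a missing "sections" key (KeyError) and a
-- SectionOrder value int() cannot parse (ValueError).
def Pre_organize_sections_by_year (subtab : List (String × List (List (String × String)))) : Prop :=
  ((PySem.Dict.mk subtab).get? "sections").isSome = true ∧
  ∀ sec ∈ ((PySem.Dict.mk subtab).get? "sections").getD [],
    (PySem.Int.ofStr? (((PySem.Dict.mk sec).get? "SectionOrder").getD "0")).isSome = true
instance (subtab : List (String × List (List (String × String)))) : Decidable (Pre_organize_sections_by_year subtab) := by unfold Pre_organize_sections_by_year; infer_instance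

def pvWitness_organize_sections_by_year : (List (String × List (List (String × String)))) :=
  [("sections", [[("Year", "2021")], [("SectionOrder", "2")]])]

def Spec_organize_sections_by_year (subtab : List (String × List (List (String × String)))) (out : List String × (List (String × List (List (String × String))))) : Prop := out = organize_sections_by_year_alt subtab
instance (subtab : List (String × List (List (String × String)))) (out : List String × (List (String × List (List (String × String))))) : Decidable (Spec_organize_sections_by_year subtab out) := by unfold Spec_organize_sections_by_year; infer_instance

-- ===== CLAIM (what is proved, stated in full; the proofs are below) =====
def Claim_equal_organize_sections_by_year : Prop := ∀ (subtab : List (String × List (List (String × String)))), Dom_organize_sections_by_year subtab → Pre_organize_sections_by_year subtab → Spec_organize_sections_by_year subtab (organize_sections_by_year subtab)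

-- ===== LEMMAS AND PROOFS =====

-- the per-section list of group keys it is appended to (A) / the years of its events (B)
def pvTgts (Y : List String) (sec : List (String × String)) : List String :=
  if pvDated sec then [pvYearStr sec] else Y

-- the (key, section) append events of A's grouping loop, in order (= B's event list)
def pvPairs (Y : List String) (S : List (List (String × String))) : List (String × List (String × String)) :=
  S.flatMap (fun sec => (pvTgts Y sec).map (fun y => (y, sec)))

-- A's year set = B's year set
lemma pvYears_eq (sections : List (List (String × String))) :
    sections.foldl (fun st sec => if pvDated sec then PySem.Set.add st (pvYearStr sec) else st)
      PySem.Set.empty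
    = PySem.Set.ofList ((sections.filter pvDated).map pvYearStr) := by
  rw [PySem.List.foldl_if_eq_foldl_filter, PySem.Set.ofList_eq_foldl, List.foldl_map]
  rfl

-- A's grouping loop is the fold of the append events
lemma pvFoldA_eq_pairs (Y : List String) (S : List (List (String × String)))
    (d : PySem.Dict String (List (List (String × String)))) :
    S.foldl (fun d sec =>
        if pvDated sec then d.modify (pvYearStr sec) [] (· ++ [sec])
        else Y.foldl (fun d y => d.modify y [] (· ++ [sec])) d) d
    = (pvPairs Y S).foldl (fun d p => d.modify p.1 [] (· ++ [p.2])) d := by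
  induction S generalizing d with
  | nil => rfl
  | cons a S ih =>
    simp only [List.foldl_cons, pvPairs, List.flatMap_cons, List.foldl_append, pvTgts]
    rw [ih]
    by_cases h : pvDated a <;>
      simp [h, pvPairs, pvTgts, List.foldl_map]

-- canonical form of a defaultdict-append fold from the empty dict
lemma pvModifyFold_items (P : List (String × List (String × String))) :
    ((P.foldl (fun d p => d.modify p.1 [] (· ++ [p.2])) PySem.Dict.empty).items)
    = (PySem.Set.ofList (P.map (·.1))).map
        (fun y => (y, (P.filter (fun p => p.1 == y)).map (·.2))) := by
  have hnd : ((P.foldl (fun d p => d.modify p.1 [] (· ++ [p.2])) PySem.Dict.empty).keys).Nodup := by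
    apply PySem.Dict.nodup_keys_foldl_modify_key
    exact PySem.Dict.nodup_keys_empty
  rw [PySem.Dict.items_eq_map_keys _ hnd []]
  rw [PySem.Dict.keys_foldl_modify_key]
  simp only [PySem.Dict.keys_empty]
  rw [show PySem.Set.update ([] : List String) (P.map (·.1)) = PySem.Set.ofList (P.map (·.1)) from rfl]
  apply List.map_congr_left
  intro y hy
  rw [PySem.Dict.getD_foldl_modify_append, PySem.Dict.getD_empty]
  simp

-- B's event list is pvPairs
lemma pvEvents_eq (Y : List String) (S : List (List (String × String))) :
    S.flatMap (fun s => (if pvDated s then [pvYearStr s] else Y).map (fun y => (y, s)))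
    = pvPairs Y S := by
  simp [pvPairs, pvTgts]

-- ===== VERDICT (by name: the statement is the Claim_ definition above) =====
theorem organize_sections_by_year_spec : Claim_equal_organize_sections_by_year := by
  intro subtab _ hpre
  unfold Spec_organize_sections_by_year
  obtain ⟨hsome, -⟩ := hpre
  unfold organize_sections_by_year organize_sections_by_year_alt
  rcases hsec : (PySem.Dict.mk subtab).get? "sections" with - | sections
  · simp [hsec] at hsome
  dsimp only
  rw [pvYears_eq sections]
  set AY := PySem.Set.ofList ((sections.filter pvDated).map pvYearStr) with hAY
  set Y := (if PySem.List.sorted AY (fun y => y) true = [] then ["all"]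
            else PySem.List.sorted AY (fun y => y) true) with hY
  set S := PySem.List.sorted sections pvOrderKey false with hS
  rw [pvEvents_eq Y S, pvFoldA_eq_pairs, pvModifyFold_items]
  have hfresh := PySem.Dict.items_foldl_insert_fresh
    (l := PySem.Set.ofList ((pvPairs Y S).map (·.1)))
    (k := fun y => y)
    (v := fun y => ((pvPairs Y S).filter (fun p => p.1 == y)).map (·.2))
    (d := PySem.Dict.empty)
    (by intro a _; exact PySem.Dict.contains_empty _)
    (by rw [List.map_id']; exact PySem.Set.nodup_ofList ((pvPairs Y S).map (·.1)))
  refine Prod.ext rfl ?_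
  rw [hfresh]
  rw [show (PySem.Dict.empty : PySem.Dict String (List (List (String × String)))).items = [] from rfl,
      List.nil_append]
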